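-- pv_equiv track=rewrite | github.com/JaviLianes8/RealTajoFCBack | src/app/infrastructure/parsers/top_scorers_pdf_parser.py | _split_player_and_team
-- ===== SOURCE A (Python) =====
-- from typing import Iterable, List, Optional, Sequence, Tuple
--
-- _TEAM_KEYWORDS = {
--     "REAL",
--     "UNION",
--     "UNIÓN",
--     "CLUB",
--     "ATLETICO",
--     "ATLÉTICO",
--     "DEPORTIVO",
--     "SPORTING",
--     "CF",
--     "C.F",
--     "C.F.",
--     "CD",
--     "C.D",
--     "C.D.",
--     "UD",
--     "U.D",
--     "U.D.",
--     "AD",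
--     "A.D",
--     "A.D.",
--     "FC",
--     "F.C",
--     "F.C.",
--     "AC",
--     "A.C",
--     "A.C.",
--     "ESC",
--     "ESC.",
--     "ESCOLA",
--     "ACADEMIA",
--     "ACADEMY",
--     "JUVENTUD",
--     "TABERNA",
--     "CAFETERIA",
--     "CAFETERÍA",
--     "NEW",
--     "GOLDEN",
--     "CHESTERFIELD",
--     "JUNIOR",
--     "SHOTS",
--     "RAIMON",
--     "SATIUT",
--     "ACADEMIA",
--     "ACADEMY",
--     "ATLETIC",
--     "ATHLETIC",
-- }
--
-- def _split_player_and_team(tokens: Sequence[str]) -> Tuple[List[str], List[str]]: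
--     """Return separate token lists for player and team names."""
--
--     if not tokens:
--         return [], []
--
--     player_tokens: List[str] = []
--     team_tokens: List[str] = []
--     seen_comma = False
--     given_after_comma = 0
--
--     for index, token in enumerate(tokens):
--         normalized = token.strip(",.").upper()
--         if not seen_comma:
--             player_tokens.append(token)
--             if "," in token:
--                 seen_comma = True
--             continue
--
--         if not team_tokens:
--             if normalized in _TEAM_KEYWORDS:
--                 team_tokens.append(token)
--                 continue
--             if given_after_comma >= 1 and index == len(tokens) - 1:
--                 team_tokens.append(token)
--                 continue
--             if given_after_comma >= 2:
--                 team_tokens.append(token)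
--                 continue
--             player_tokens.append(token)
--             given_after_comma += 1
--             continue
--
--         team_tokens.append(token)
--
--     if not seen_comma and tokens:
--         return list(tokens), []
--
--     if not team_tokens and len(tokens) > len(player_tokens):
--         team_tokens = list(tokens[len(player_tokens) :])
--
--     return player_tokens, team_tokens
-- ===== SOURCE B (Python) =====
-- from typing import List, Sequence, Tuple
--
-- _TEAM_KEYWORDS = {
--     "REAL", "UNION", "UNIÓN", "CLUB", "ATLETICO", "ATLÉTICO", "DEPORTIVO",
--     "SPORTING", "CF", "C.F", "C.F.", "CD", "C.D", "C.D.", "UD", "U.D", "U.D.",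
--     "AD", "A.D", "A.D.", "FC", "F.C", "F.C.", "AC", "A.C", "A.C.", "ESC",
--     "ESC.", "ESCOLA", "ACADEMIA", "ACADEMY", "JUVENTUD", "TABERNA",
--     "CAFETERIA", "CAFETERÍA", "NEW", "GOLDEN", "CHESTERFIELD", "JUNIOR",
--     "SHOTS", "RAIMON", "SATIUT", "ATLETIC", "ATHLETIC",
-- }
--
--
-- def _is_keyword(token: str) -> bool:
--     return token.strip(",.").upper() in _TEAM_KEYWORDS
--
--
-- def _split_player_and_team(tokens: Sequence[str]) -> Tuple[List[str], List[str]]: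
--     # The result is always a single cut: (tokens[:k], tokens[k:]).
--     # After the comma token, at most two extra given names are allowed, so the
--     # team start has a closed form over the first two post-comma tokens.
--     toks = list(tokens)
--     b = next((i for i, t in enumerate(toks) if "," in t), None)
--     if b is None:
--         return toks, []
--     n = len(toks) - b - 1          # number of post-comma tokens
--     if n == 0:
--         j = 0
--     elif _is_keyword(toks[b + 1]):
--         j = 0                      # team starts immediately
--     elif n == 1:
--         j = 1                      # single trailing given name, no team
--     elif _is_keyword(toks[b + 2]) or n == 2:
--         j = 1                      # one given name, then team (keyword or last token)
--     else:
--         j = 2                      # two given names max, rest is team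
--     k = b + 1 + j
--     return toks[:k], toks[k:]
-- ===== Notes on version B (the rewrite author's own statement) =====
-- stated objective: simpler
-- what changed: A threads a stateful loop over every token (seen_comma flag, given_after_comma counter, two growing lists, two post-loop fallbacks); B observes the result is always a single cut (tokens[:k], tokens[k:]) and computes k in closed form: the first comma index plus an offset 0/1/2 decided by at most two keyword tests on the next two tokens - no tail loop, no counter, no fallbacks.
import Mathlib
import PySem

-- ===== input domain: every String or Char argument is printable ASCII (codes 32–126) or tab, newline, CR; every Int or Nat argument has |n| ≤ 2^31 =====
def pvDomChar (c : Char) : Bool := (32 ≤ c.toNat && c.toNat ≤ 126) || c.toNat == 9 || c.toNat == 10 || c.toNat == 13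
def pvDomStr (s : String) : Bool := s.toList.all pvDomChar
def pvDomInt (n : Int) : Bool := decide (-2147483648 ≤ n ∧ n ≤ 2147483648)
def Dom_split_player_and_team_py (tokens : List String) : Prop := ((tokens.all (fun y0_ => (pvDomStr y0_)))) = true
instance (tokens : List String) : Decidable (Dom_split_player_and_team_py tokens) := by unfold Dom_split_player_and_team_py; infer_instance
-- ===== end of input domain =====

-- B replaces A's stateful loop (flags, counter, two growing lists, two fallbacks) by a closed
-- form: the result is always one cut (tokens[:k], tokens[k:]) and k is computed from the first
-- comma index and at most two keyword tests; simpler, no tail loop at all.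

-- ===== PORT A =====
-- the module constant _TEAM_KEYWORDS (a Python set literal; membership only, so order is irrelevant)
def pvKeywords : PySem.Set String := PySem.Set.ofList
  ["REAL", "UNION", "UNIÓN", "CLUB", "ATLETICO", "ATLÉTICO", "DEPORTIVO",
   "SPORTING", "CF", "C.F", "C.F.", "CD", "C.D", "C.D.", "UD", "U.D", "U.D.",
   "AD", "A.D", "A.D.", "FC", "F.C", "F.C.", "AC", "A.C", "A.C.", "ESC",
   "ESC.", "ESCOLA", "ACADEMIA", "ACADEMY", "JUVENTUD", "TABERNA",
   "CAFETERIA", "CAFETERÍA", "NEW", "GOLDEN", "CHESTERFIELD", "JUNIOR",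
   "SHOTS", "RAIMON", "SATIUT", "ATLETIC", "ATHLETIC"]

-- token.strip(",.").upper()
def pvNorm (t : String) : String := PySem.Str.upper (PySem.Str.stripChars t ",.")

-- the body of A's for-loop; state = (player_tokens, team_tokens, seen_comma, given_after_comma)
def pvStepA (L : Int) (st : List String × List String × Bool × Int) (p : Int × String) :
    List String × List String × Bool × Int :=
  if !st.2.2.1 then
    (st.1 ++ [p.2], st.2.1, (if PySem.Str.isIn "," p.2 then true else st.2.2.1), st.2.2.2)
  else if st.2.1.isEmpty then
    if pvKeywords.contains (pvNorm p.2) then (st.1, st.2.1 ++ [p.2], st.2.2.1, st.2.2.2)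
    else if decide (1 ≤ st.2.2.2) && (p.1 == L - 1) then (st.1, st.2.1 ++ [p.2], st.2.2.1, st.2.2.2)
    else if decide (2 ≤ st.2.2.2) then (st.1, st.2.1 ++ [p.2], st.2.2.1, st.2.2.2)
    else (st.1 ++ [p.2], st.2.1, st.2.2.1, st.2.2.2 + 1)
  else (st.1, st.2.1 ++ [p.2], st.2.2.1, st.2.2.2)

def split_player_and_team_py (tokens : List String) : List String × List String :=
  if tokens.isEmpty then ([], [])
  else
    let st := (PySem.List.enumerate tokens 0).foldl (pvStepA (tokens.length : Int))
      ([], [], false, 0)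
    if !st.2.2.1 then (tokens, [])
    else
      let team := if st.2.1.isEmpty && decide ((tokens.length : Int) > (st.1.length : Int))
        then PySem.List.slice tokens (some (st.1.length : Int)) none
        else st.2.1
      (st.1, team)

-- ===== PORT B =====
-- Source B's _is_keyword
def pvIsKw (t : String) : Bool := pvKeywords.contains (pvNorm t)

-- Source B's closed-form split: b = index of the first comma token; toks[b+1], toks[b+2] are read
-- only under guards that keep the index in range, so getD's default is never used (exact).
def split_player_and_team_py_alt (tokens : List String) : List String × List String :=
  match tokens.findIdx? (fun t => PySem.Str.isIn "," t) with
  | none => (tokens, [])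
  | some b =>
    let n := tokens.length - b - 1
    let j : Nat :=
      if n = 0 then 0
      else if pvIsKw (tokens.getD (b + 1) "") then 0
      else if n = 1 then 1
      else if pvIsKw (tokens.getD (b + 2) "") || n = 2 then 1
      else 2
    let k := b + 1 + j
    (tokens.take k, tokens.drop k)

-- ===== PRECONDITION & SPEC =====
def Spec_split_player_and_team_py (tokens : List String) (out : List String × List String) : Prop := out = split_player_and_team_py_alt tokens
instance (tokens : List String) (out : List String × List String) : Decidable (Spec_split_player_and_team_py tokens out) := by unfold Spec_split_player_and_team_py; infer_instance

-- ===== CLAIM (what is proved, stated in full; the proofs are below) =====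
def Claim_equal_split_player_and_team_py : Prop := ∀ (tokens : List String), Dom_split_player_and_team_py tokens → Spec_split_player_and_team_py tokens (split_player_and_team_py tokens)

-- ===== LEMMAS AND PROOFS =====

-- proof-only intermediate: the first index j of the tail where A's loop starts the team
def pvCond (n j : Nat) (t : String) : Bool :=
  pvIsKw t || decide (2 ≤ j) || (decide (1 ≤ j) && (j == n - 1))

def pvScanTail (n j : Nat) : List String → List String × List String
  | [] => ([], [])
  | t :: rs =>
    if pvCond n j t then ([], t :: rs)
    else
      let r := pvScanTail n (j+1) rs
      (t :: r.1, r.2)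

-- the closed-form team offset B computes, expressed on the tail itself
def pvJ : List String → Nat
  | [] => 0
  | t :: rest =>
    if pvIsKw t then 0
    else match rest with
      | [] => 1
      | u :: rs => if pvIsKw u || rs.isEmpty then 1 else 2

theorem pvEnumerate_append (xs ys : List String) (s : Int) :
    PySem.List.enumerate (xs ++ ys) s
      = PySem.List.enumerate xs s ++ PySem.List.enumerate ys (s + xs.length) := by
  induction xs generalizing s with
  | nil => simp [PySem.List.enumerate_nil]
  | cons x xs ih =>
    simp [PySem.List.enumerate_cons, ih (s + 1)]
    ring_nf

-- phase 1: before any comma every token goes to player_tokens, state otherwise unchanged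
theorem pvPhase1 (L : Int) (pre : List String)
    (h : ∀ t ∈ pre, PySem.Str.isIn "," t = false) :
    ∀ (pl tm : List String) (g : Int) (s : Int),
    (PySem.List.enumerate pre s).foldl (pvStepA L) (pl, tm, false, g) = (pl ++ pre, tm, false, g) := by
  induction pre with
  | nil => intro pl tm g s; simp [PySem.List.enumerate_nil]
  | cons t rs ih =>
    intro pl tm g s
    have ht : PySem.Str.isIn "," t = false := h t (by simp)
    rw [PySem.List.enumerate_cons]
    simp only [List.foldl_cons]
    rw [show pvStepA L (pl, tm, false, g) (s, t) = (pl ++ [t], tm, false, g) by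
      simp [pvStepA, show PySem.Chars.isIn [','] t.toList = false by simpa using ht]]
    rw [ih (fun x hx => h x (by simp [hx])) (pl ++ [t]) tm g (s + 1)]
    simp

-- phase 3: once team_tokens is nonempty every remaining token goes to team_tokens
theorem pvPhase3 (L : Int) (rest : List String) :
    ∀ (pl tm : List String) (g : Int) (s : Int), tm ≠ [] →
    (PySem.List.enumerate rest s).foldl (pvStepA L) (pl, tm, true, g) = (pl, tm ++ rest, true, g) := by
  induction rest with
  | nil => intro pl tm g s _; simp [PySem.List.enumerate_nil]
  | cons t rs ih =>
    intro pl tm g s htm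
    rw [PySem.List.enumerate_cons]
    simp only [List.foldl_cons]
    rw [show pvStepA L (pl, tm, true, g) (s, t) = (pl, tm ++ [t], true, g) by
      simp [pvStepA, List.isEmpty_iff, htm]]
    rw [ih pl (tm ++ [t]) g (s + 1) (by simp)]
    simp

-- phase 2: between the comma and the start of the team, A's loop realises exactly pvScanTail
theorem pvPhase2 (L : Int) (n : Nat) (rest : List String) :
    ∀ (j : Nat) (s : Int) (pl : List String),
    s + rest.length = L → j + rest.length = n →
    (PySem.List.enumerate rest s).foldl (pvStepA L) (pl, [], true, (j : Int))
      = (pl ++ (pvScanTail n j rest).1, (pvScanTail n j rest).2, true,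
         ((j + (pvScanTail n j rest).1.length : Nat) : Int)) := by
  induction rest with
  | nil => intro j s pl _ _; simp [PySem.List.enumerate_nil, pvScanTail]
  | cons t rs ih =>
    intro j s pl hs hn
    simp only [List.length_cons] at hs hn
    rw [PySem.List.enumerate_cons]
    simp only [List.foldl_cons]
    by_cases hc : pvCond n j t = true
    · have hstep : pvStepA L (pl, [], true, (j : Int)) (s, t) = (pl, [t], true, (j : Int)) := by
        simp only [pvCond, pvIsKw, Bool.or_eq_true, Bool.and_eq_true, decide_eq_true_eq, beq_iff_eq] at hc
        rcases hc with (hkw | h2) | ⟨h1, hlast⟩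
        · have hkw' : pvNorm t ∈ pvKeywords := by simpa using hkw
          simp [pvStepA, hkw']
        · have h2' : (2:Int) ≤ (j:Int) := by exact_mod_cast h2
          by_cases hkw : pvNorm t ∈ pvKeywords <;>
            by_cases hmid : 1 ≤ j ∧ s = L - 1 <;>
            simp [pvStepA, hkw, hmid, h2']
        · have hrs : rs.length = 0 := by omega
          have hsL : s = L - 1 := by omega
          have h1' : (1:Int) ≤ (j:Int) := by exact_mod_cast h1
          by_cases hkw : pvNorm t ∈ pvKeywords <;>
            simp [pvStepA, hkw, hsL, h1']
      rw [hstep, pvPhase3 L rs pl [t] (j : Int) (s + 1) (by simp)]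
      simp [pvScanTail, hc]
    · have hc' := hc
      simp only [pvCond, pvIsKw, Bool.or_eq_true, Bool.and_eq_true, decide_eq_true_eq, beq_iff_eq,
        not_or, not_and] at hc'
      obtain ⟨⟨hkw, h2⟩, h1⟩ := hc'
      have hmidp : ¬ (1 ≤ j ∧ s = L - 1) := by
        rintro ⟨hj, hsL⟩
        have hrs0 : rs.length = 0 := by omega
        exact (h1 hj) (by omega)
      have hkw' : pvNorm t ∉ pvKeywords := by simpa using hkw
      have hstep : pvStepA L (pl, [], true, (j : Int)) (s, t)
          = (pl ++ [t], [], true, (j : Int) + 1) := by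
        simp [pvStepA, hkw', hmidp, h2]
      have hcast : ((j : Int) + 1) = ((j + 1 : Nat) : Int) := by push_cast; ring
      rw [hstep, hcast, ih (j + 1) (s + 1) (pl ++ [t]) (by omega) (by omega)]
      have hcb : pvCond n j t = false := by simpa using hc
      simp only [pvScanTail, hcb, Bool.false_eq_true, if_false, List.length_cons,
        List.append_assoc, List.singleton_append, Prod.mk.injEq]
      refine ⟨trivial, trivial, trivial, by omega⟩

-- the scan of the whole tail is exactly the closed-form cut at pvJ
theorem pvScan_take_drop (tail : List String) :
    pvScanTail tail.length 0 tail = (tail.take (pvJ tail), tail.drop (pvJ tail)) := by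
  rcases tail with _ | ⟨t, _ | ⟨u, rs⟩⟩
  · simp [pvScanTail, pvJ]
  · by_cases hk : pvIsKw t
    · simp [pvScanTail, pvCond, pvJ, hk]
    · simp [pvScanTail, pvCond, pvJ, hk]
  · by_cases hk : pvIsKw t
    · simp [pvScanTail, pvCond, pvJ, hk]
    · by_cases hku : pvIsKw u
      · simp [pvScanTail, pvCond, pvJ, hk, hku]
      · rcases rs with _ | ⟨v, vs⟩
        · simp [pvScanTail, pvCond, pvJ, hk, hku]
        · have h1 : pvCond (vs.length + 1 + 1 + 1) 0 t = false := by simp [pvCond, hk]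
          have h2 : pvCond (vs.length + 1 + 1 + 1) 1 u = false := by simp [pvCond, hku]
          have h3 : pvCond (vs.length + 1 + 1 + 1) 2 v = true := by simp [pvCond]
          simp [pvScanTail, pvJ, h1, h2, h3, hk, hku]

-- B's closed-form j equals pvJ of the tail
theorem pvJ_eq (tokens : List String) (b : Nat) (hb : b < tokens.length) :
    (if tokens.length - b - 1 = 0 then 0
     else if pvIsKw (tokens.getD (b + 1) "") then 0
     else if tokens.length - b - 1 = 1 then 1
     else if pvIsKw (tokens.getD (b + 2) "") || tokens.length - b - 1 = 2 then 1
     else 2) = pvJ (tokens.drop (b + 1)) := by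
  have hg1 : tokens.getD (b + 1) "" = (tokens.drop (b + 1)).getD 0 "" := by
    simp [List.getD, List.getElem?_drop]
  have hg2 : tokens.getD (b + 2) "" = (tokens.drop (b + 1)).getD 1 "" := by
    simp [List.getD, List.getElem?_drop]
  have hlen : (tokens.drop (b + 1)).length = tokens.length - b - 1 := by
    simp; omega
  rcases hdrop : tokens.drop (b + 1) with _ | ⟨t, _ | ⟨u, rs⟩⟩ <;>
    rw [hdrop] at hg1 hg2 hlen
  · simp only [List.length_nil] at hlen
    rw [if_pos (by omega)]
    simp [pvJ]
  · simp only [List.length_cons, List.length_nil] at hlen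
    have hg1' : tokens.getD (b + 1) "" = t := by simpa [List.getD] using hg1
    rw [if_neg (by omega), hg1']
    by_cases hk : pvIsKw t
    · simp [pvJ, hk]
    · rw [if_neg (by simp [hk]), if_pos (by omega)]
      simp [pvJ, hk]
  · simp only [List.length_cons] at hlen
    have hg1' : tokens.getD (b + 1) "" = t := by simpa [List.getD] using hg1
    have hg2' : tokens.getD (b + 2) "" = u := by simpa [List.getD] using hg2
    rw [if_neg (by omega), hg1', hg2']
    by_cases hk : pvIsKw t
    · simp [pvJ, hk]
    · rw [if_neg (by simp [hk]), if_neg (by omega)]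
      by_cases hku : pvIsKw u
      · simp [pvJ, hk, hku]
      · by_cases hrs : rs = []
        · have hrl : rs.length = 0 := by simp [hrs]
          rw [if_pos (by simp [hku]; omega)]
          simp [pvJ, hk, hku, hrs]
        · have hrl : rs.length ≠ 0 := by simpa using hrs
          rw [if_neg (by simp [hku]; omega)]
          simp [pvJ, hk, hku, List.isEmpty_iff, hrs]

-- if the scan never starts a team, the whole tail went to player
theorem pvScanTail_none (n : Nat) (rest : List String) :
    ∀ j, (pvScanTail n j rest).2 = [] → (pvScanTail n j rest).1 = rest := by
  induction rest with
  | nil => intro j _; simp [pvScanTail]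
  | cons t rs ih =>
    intro j h
    by_cases hc : pvCond n j t = true
    · simp [pvScanTail, hc] at h
    · simp only [pvScanTail, if_neg hc] at h ⊢
      simp [ih (j + 1) h]

-- ===== VERDICT (by name: the statement is the Claim_ definition above) =====
theorem split_player_and_team_py_spec : Claim_equal_split_player_and_team_py := by
  intro tokens _
  unfold Spec_split_player_and_team_py split_player_and_team_py split_player_and_team_py_alt
  rcases htok : tokens.findIdx? (fun t => PySem.Str.isIn "," t) with _ | b
  · rcases tokens with _ | ⟨t, ts⟩
    · simp
    · have hnone := List.findIdx?_eq_none_iff.mp htok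
      rw [if_neg (by simp)]
      rw [pvPhase1 _ _ hnone [] [] 0 0]
      simp
  · obtain ⟨hb, hcomma, hbefore⟩ := List.findIdx?_eq_some_iff_getElem.mp htok
    have hne : ¬ tokens.isEmpty := by
      rcases tokens with _ | _
      · simp at hb
      · simp
    rw [if_neg hne]
    have hdecomp : tokens = (tokens.take b ++ [tokens[b]]) ++ tokens.drop (b + 1) := by
      rw [List.take_append_getElem hb, List.take_append_drop]
    set L : Int := (tokens.length : Int) with hL
    have hlen_take : (tokens.take b).length = b := by simp [Nat.le_of_lt hb]
    generalize hst : (PySem.List.enumerate tokens 0).foldl (pvStepA L) ([], [], false, 0) = st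
    have henum : PySem.List.enumerate tokens 0
          = PySem.List.enumerate (tokens.take b) 0
            ++ PySem.List.enumerate [tokens[b]] (b : Int)
            ++ PySem.List.enumerate (tokens.drop (b+1)) ((b : Int) + 1) := by
      conv_lhs => rw [hdecomp]
      rw [pvEnumerate_append, pvEnumerate_append]
      have e1 : ((0:Int) + ((tokens.take b).length : Int)) = (b : Int) := by
        rw [hlen_take]; ring
      have e2 : ((0:Int) + (((tokens.take b ++ [tokens[b]]).length : Nat) : Int))
          = (b : Int) + 1 := by
        rw [List.length_append, hlen_take]; push_cast; simp
      rw [e1, e2]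
    rw [henum, List.foldl_append, List.foldl_append] at hst
    rw [pvPhase1 L (tokens.take b) (fun t ht => by
          obtain ⟨i, hi, rfl⟩ := List.mem_take_iff_getElem.mp ht
          exact Bool.not_eq_true _ ▸ hbefore i (by omega)) [] [] 0 0] at hst
    rw [PySem.List.enumerate_cons, PySem.List.enumerate_nil] at hst
    simp only [List.foldl_cons, List.foldl_nil] at hst
    rw [show pvStepA L (([] : List String) ++ tokens.take b, ([] : List String), false, 0) ((b : Int), tokens[b])
          = (tokens.take (b+1), [], true, 0) by
      simp [pvStepA, List.take_append_getElem hb,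
        show PySem.Chars.isIn [','] tokens[b].toList = true by simpa using hcomma]] at hst
    have hdroplen : (tokens.drop (b+1)).length = tokens.length - (b+1) := by simp
    have hph2 := pvPhase2 L (tokens.drop (b+1)).length (tokens.drop (b+1)) 0 ((b : Int) + 1)
      (tokens.take (b+1)) (by rw [hdroplen, hL]; omega) (by omega)
    rw [Nat.cast_zero] at hph2
    rw [hph2] at hst
    subst hst
    simp only []
    rw [pvScan_take_drop (tokens.drop (b+1))]
    rw [pvJ_eq tokens b hb]
    by_cases hteam : (tokens.drop (b + 1)).drop (pvJ (tokens.drop (b + 1))) = []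
    · have hall := pvScanTail_none (tokens.drop (b+1)).length (tokens.drop (b+1)) 0
        (by rw [pvScan_take_drop]; exact hteam)
      rw [pvScan_take_drop] at hall
      have hge : tokens.length ≤ b + 1 + pvJ (tokens.drop (b+1)) := by
        have hl := congrArg List.length hall
        simp at hl
        omega
      rw [List.take_of_length_le hge, List.drop_eq_nil_of_le hge]
      have hall2 : List.take (pvJ (tokens.drop (b+1))) (tokens.drop (b+1)) = tokens.drop (b+1) := hall
      simp only [hteam, List.isEmpty_nil, hall2, List.take_append_drop]
      simp [hL]
    · have htake : tokens.take (b + 1 + pvJ (tokens.drop (b + 1)))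
          = tokens.take (b + 1) ++ (tokens.drop (b + 1)).take (pvJ (tokens.drop (b + 1))) :=
        List.take_add ..
      have hdropJ : tokens.drop (b + 1 + pvJ (tokens.drop (b + 1)))
          = (tokens.drop (b + 1)).drop (pvJ (tokens.drop (b + 1))) := by
        rw [List.drop_drop]
      have hfalse : ((tokens.drop (b + 1)).drop (pvJ (tokens.drop (b + 1)))).isEmpty = false := by
        simpa [List.isEmpty_iff] using hteam
      rw [htake, hdropJ]
      simp only [Bool.not_true, Bool.false_eq_true, if_false, hfalse, Bool.false_and]
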